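-- pv_equiv track=rewrite | github.com/tantalusblank/roborover | tests/test_main.py | is_msg_sequence_in_logs
-- ===== SOURCE A (Python) =====
-- def is_msg_sequence_in_logs(
--     log_messages: list[str], expected_message_sequence: list[str]
-- ) -> bool:
--     """Check if an exact sequence of messages is in the log messages.
--
--     Checks that the messages appear both in order and consecutively.
--     """
--     n = len(expected_message_sequence)
--     return any(
--         log_messages[i : i + n] == expected_message_sequence
--         for i in range(len(log_messages) - n + 1)
--     )
-- ===== SOURCE B (Python) =====
-- def is_msg_sequence_in_logs(
--     log_messages: list[str], expected_message_sequence: list[str]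
-- ) -> bool:
--     """One-pass set-of-states scan: active holds the lengths of all partial
--     matches of the expected sequence ending at the current position."""
--     n = len(expected_message_sequence)
--     if n == 0:
--         return True
--     active = set()
--     for msg in log_messages:
--         active = {j + 1 for j in active | {0} if expected_message_sequence[j] == msg}
--         if n in active:
--             return True
--     return False
-- ===== Notes on version B (the rewrite author's own statement) =====
-- stated objective: alternative
-- what changed: B replaces A's slice-at-every-start-position scan with a single left-to-right pass that maintains the set of partial-match lengths ending at the current position (NFA simulation of the pattern), returning as soon as a full match length appears.
import Mathlib
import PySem

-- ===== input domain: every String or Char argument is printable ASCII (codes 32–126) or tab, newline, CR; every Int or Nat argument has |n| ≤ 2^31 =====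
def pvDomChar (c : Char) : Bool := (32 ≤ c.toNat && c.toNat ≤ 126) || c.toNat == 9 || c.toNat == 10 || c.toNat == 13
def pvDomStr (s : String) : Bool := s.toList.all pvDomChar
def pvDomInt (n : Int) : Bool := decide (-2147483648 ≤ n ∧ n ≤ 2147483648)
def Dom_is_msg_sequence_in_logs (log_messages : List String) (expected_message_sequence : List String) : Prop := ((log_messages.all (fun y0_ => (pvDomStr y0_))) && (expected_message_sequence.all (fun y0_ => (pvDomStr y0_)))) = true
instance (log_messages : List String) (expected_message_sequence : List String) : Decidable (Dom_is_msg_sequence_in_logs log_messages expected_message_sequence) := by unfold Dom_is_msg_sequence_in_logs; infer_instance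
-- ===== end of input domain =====

-- B replaces the slice-per-start-position scan with a one-pass set-of-states (NFA) scan; objective: alternative algorithm, similar worst-case cost.

-- ===== PORT A =====
def is_msg_sequence_in_logs (log_messages : List String) (expected_message_sequence : List String) : Bool :=
  let n : Int := expected_message_sequence.length
  (PySem.List.pyRange 0 ((log_messages.length : Int) - n + 1) 1).any
    (fun i => PySem.List.slice log_messages (some i) (some (i + n)) == expected_message_sequence)

-- ===== PORT B =====
-- {j + 1 for j in active | {0} if expected_message_sequence[j] == msg}
-- (exact on every reachable state: each j ∈ active ∪ {0} satisfies 0 ≤ j < len(expected), so pyGetD's default is never used)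
def altStep (expected : List String) (active : PySem.Set Int) (msg : String) : PySem.Set Int :=
  PySem.Set.ofList
    (((PySem.Set.union active [0]).filter
        (fun j => PySem.List.pyGetD expected j "" == msg)).map (· + 1))

-- the 'for msg in log_messages' loop with its early 'return True'
def altGo (expected : List String) (n : Int) (active : PySem.Set Int) : List String → Bool
  | [] => false
  | msg :: rest =>
    let active' := altStep expected active msg
    if active'.contains n then true else altGo expected n active' rest

def is_msg_sequence_in_logs_alt (log_messages : List String) (expected_message_sequence : List String) : Bool :=
  let n : Int := expected_message_sequence.length
  if n == 0 then true
  else altGo expected_message_sequence n PySem.Set.empty log_messages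

-- ===== PRECONDITION & SPEC =====
def Spec_is_msg_sequence_in_logs (log_messages : List String) (expected_message_sequence : List String) (out : Bool) : Prop := out = is_msg_sequence_in_logs_alt log_messages expected_message_sequence
instance (log_messages : List String) (expected_message_sequence : List String) (out : Bool) : Decidable (Spec_is_msg_sequence_in_logs log_messages expected_message_sequence out) := by unfold Spec_is_msg_sequence_in_logs; infer_instance

-- ===== CLAIM (what is proved, stated in full; the proofs are below) =====
def Claim_equal_is_msg_sequence_in_logs : Prop := ∀ (log_messages : List String) (expected_message_sequence : List String), Dom_is_msg_sequence_in_logs log_messages expected_message_sequence → Spec_is_msg_sequence_in_logs log_messages expected_message_sequence (is_msg_sequence_in_logs log_messages expected_message_sequence)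

-- ===== LEMMAS AND PROOFS =====

-- the common characterisation: the window of length |exp| starting at i matches exp
def Win (logs exp : List String) (i : Nat) : Prop :=
  i + exp.length ≤ logs.length ∧ (logs.drop i).take exp.length = exp

-- the loop invariant: active is exactly the set of lengths of proper partial matches ending at the end of 'seen'
def ActInv (exp seen : List String) (active : List Int) : Prop :=
  ∀ j : Int, j ∈ active ↔ ∃ k : Nat, j = (k : Int) ∧ 1 ≤ k ∧ k < exp.length ∧ k ≤ seen.length ∧
    seen.drop (seen.length - k) = exp.take k

lemma A_iff (logs exp : List String) :
    is_msg_sequence_in_logs logs exp = true ↔ ∃ i : Nat, Win logs exp i := by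
  unfold is_msg_sequence_in_logs Win
  simp only [List.any_eq_true, PySem.List.mem_pyRange_one, beq_iff_eq]
  constructor
  · rintro ⟨i, ⟨h0, h1⟩, hs⟩
    lift i to ℕ using h0 with k
    rw [PySem.List.slice_natCast_add] at hs
    exact ⟨k, by omega, hs⟩
  · rintro ⟨k, hk, hw⟩
    refine ⟨(k : Int), ⟨by positivity, by omega⟩, ?_⟩
    rw [PySem.List.slice_natCast_add]; exact hw

lemma take_succ_eq (exp : List String) (k : Nat) (hk : k < exp.length) :
    exp.take (k + 1) = exp.take k ++ [exp[k]] := by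
  rw [List.take_add_one, List.getElem?_eq_getElem hk]; rfl

lemma mem_altStep (exp seen : List String) (active : List Int) (msg : String)
    (hinv : ActInv exp seen active) (hne : exp ≠ []) (j : Int) :
    j ∈ altStep exp active msg ↔ ∃ k : Nat, j = (k : Int) ∧ 1 ≤ k ∧ k ≤ exp.length ∧
      k ≤ seen.length + 1 ∧ (seen ++ [msg]).drop (seen.length + 1 - k) = exp.take k := by
  unfold altStep
  rw [PySem.Set.mem_ofList]
  simp only [List.mem_map, List.mem_filter, PySem.Set.mem_union, beq_iff_eq]
  constructor
  · rintro ⟨j0, ⟨hj0, hcond⟩, rfl⟩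
    rcases hj0 with hj0 | hj0
    · -- j0 ∈ active
      obtain ⟨k0, rfl, hk1, hkE, hkS, hsuf⟩ := (hinv j0).mp hj0
      refine ⟨k0 + 1, by push_cast; ring, by omega, by omega, by omega, ?_⟩
      have h1 : seen.length + 1 - (k0 + 1) = seen.length - k0 := by omega
      rw [h1, List.drop_append_of_le_length (by omega), hsuf, take_succ_eq exp k0 hkE]
      rw [PySem.List.pyGetD_natCast] at hcond
      rw [List.getD_eq_getElem _ _ hkE] at hcond
      rw [hcond]
    · -- j0 = 0
      simp only [List.mem_singleton] at hj0
      subst hj0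
      have hlen : 0 < exp.length := List.length_pos_iff.mpr hne
      refine ⟨1, by norm_num, le_refl 1, by omega, by omega, ?_⟩
      have h1 : seen.length + 1 - 1 = seen.length := by omega
      rw [h1, List.drop_append_of_le_length (le_refl _), List.drop_length, List.nil_append]
      rw [PySem.List.pyGetD_zero] at hcond
      match exp, hne with
      | h :: t, _ =>
        simp only [List.getD, List.getElem?_cons_zero, Option.getD_some] at hcond
        simp [hcond]
  · rintro ⟨k, rfl, hk1, hkE, hkS, hsuf⟩
    obtain ⟨k0, rfl⟩ : ∃ k0, k = k0 + 1 := ⟨k - 1, by omega⟩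
    have h1 : seen.length + 1 - (k0 + 1) = seen.length - k0 := by omega
    rw [h1, List.drop_append_of_le_length (by omega), take_succ_eq exp k0 (by omega)] at hsuf
    obtain ⟨hsuf0, hmsg⟩ := List.append_singleton_inj.mp hsuf
    have hcond : PySem.List.pyGetD exp (k0 : Int) "" = msg := by
      rw [PySem.List.pyGetD_natCast, List.getD_eq_getElem _ _ (by omega)]
      exact hmsg.symm
    refine ⟨(k0 : Int), ⟨?_, hcond⟩, by push_cast; ring⟩
    by_cases h0 : k0 = 0
    · right; simp [h0]
    · left
      exact (hinv _).mpr ⟨k0, rfl, by omega, by omega, by omega, hsuf0⟩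

lemma suffix_of_window (exp seen' rest' : List String) (i : Nat)
    (hlen : i + exp.length = seen'.length)
    (hw : ((seen' ++ rest').drop i).take exp.length = exp) :
    seen'.drop i = exp := by
  rw [List.drop_append_of_le_length (by omega), List.take_left' (by simp [List.length_drop]; omega)] at hw
  exact hw

lemma altGo_iff (exp : List String) (hne : exp ≠ []) :
    ∀ (rest seen : List String) (active : List Int), ActInv exp seen active →
    (altGo exp (exp.length : Int) active rest = true ↔
      ∃ i : Nat, i + exp.length ≤ seen.length + rest.length ∧ seen.length < i + exp.length ∧
        ((seen ++ rest).drop i).take exp.length = exp) := by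
  intro rest
  have hm : 0 < exp.length := List.length_pos_iff.mpr hne
  induction rest with
  | nil =>
    intro seen active _
    refine iff_of_false (by simp [altGo]) ?_
    rintro ⟨i, h1, h2, _⟩
    simp at h1
    omega
  | cons msg rest' ih =>
    intro seen active hinv
    have hmem := mem_altStep exp seen active msg hinv hne
    rw [altGo]
    by_cases hc : (altStep exp active msg).contains ((exp.length : Nat) : Int) = true
    · rw [if_pos hc]
      have hmemn := (PySem.Set.contains_iff _ _).mp hc
      obtain ⟨k, hkj, hk1, hkE, hkS, hsuf⟩ := (hmem _).mp hmemn
      have hk : k = exp.length := by exact_mod_cast hkj.symm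
      subst hk
      simp only [true_iff]
      refine ⟨seen.length + 1 - exp.length, by simp; omega, by omega, ?_⟩
      rw [List.append_cons, List.drop_append_of_le_length (by simp),
        List.take_left' (by simp [List.length_drop]; omega)]

      rw [hsuf, List.take_length]
    · rw [if_neg hc]
      have hnot : ((exp.length : Nat) : Int) ∉ altStep exp active msg :=
        fun h => hc ((PySem.Set.contains_iff _ _).mpr h)
      have hinv' : ActInv exp (seen ++ [msg]) (altStep exp active msg) := by
        intro j
        rw [hmem j]
        constructor
        · rintro ⟨k, rfl, h1, hE, hS, hsuf⟩
          have hkne : k ≠ exp.length := fun hk =>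
            hnot (hk ▸ ((hmem _).mpr ⟨k, rfl, h1, hE, hS, hsuf⟩))
          exact ⟨k, rfl, h1, by omega, by simpa using hS, by simpa using hsuf⟩
        · rintro ⟨k, rfl, h1, hE, hS, hsuf⟩
          exact ⟨k, rfl, h1, by omega, by simpa using hS, by simpa using hsuf⟩
      rw [ih (seen ++ [msg]) _ hinv']
      constructor
      · rintro ⟨i, h1, h2, hw⟩
        refine ⟨i, by simp only [List.length_append, List.length_cons, List.length_nil] at h1 ⊢; omega, by simp only [List.length_append, List.length_cons, List.length_nil] at h2; omega, ?_⟩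
        rw [List.append_cons seen msg rest']
        simpa using hw
      · rintro ⟨i, h1, h2, hw⟩
        rw [List.append_cons seen msg rest'] at hw
        by_cases h3 : seen.length + 1 < i + exp.length
        · exact ⟨i, by simp only [List.length_append, List.length_cons, List.length_nil] at h1 ⊢; omega, by simp only [List.length_append, List.length_cons, List.length_nil]; omega, by simpa using hw⟩
        · exfalso
          apply hnot
          have hieq : i + exp.length = (seen ++ [msg]).length := by simp; omega
          have hdrop := suffix_of_window exp (seen ++ [msg]) rest' i hieq (by simpa using hw)
          refine (hmem _).mpr ⟨exp.length, rfl, by omega, le_refl _, by omega, ?_⟩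
          rw [show seen.length + 1 - exp.length = i by simp at hieq; omega, hdrop, List.take_length]

-- ===== VERDICT (by name: the statement is the Claim_ definition above) =====
theorem is_msg_sequence_in_logs_spec : Claim_equal_is_msg_sequence_in_logs := by
  intro logs exp _
  unfold Spec_is_msg_sequence_in_logs is_msg_sequence_in_logs_alt
  by_cases hne : exp = []
  · subst hne
    have hA : is_msg_sequence_in_logs logs [] = true :=
      (A_iff logs []).mpr ⟨0, by simp [Win]⟩
    simp [hA]
  · have h0 : ¬ (((exp.length : Nat) : Int) == 0) = true := by
      simp only [beq_iff_eq]
      exact_mod_cast fun h => hne (List.length_eq_zero_iff.mp h)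
    rw [if_neg h0]
    have hinv0 : ActInv exp [] PySem.Set.empty := by
      intro j
      simp only [PySem.Set.empty, List.not_mem_nil, false_iff, not_exists]
      rintro k ⟨_, h1, _, hS, _⟩
      simp at hS
      omega
    have hB := altGo_iff exp hne logs [] PySem.Set.empty hinv0
    simp only [List.length_nil, List.nil_append, Nat.zero_add] at hB
    rw [Bool.eq_iff_iff, A_iff, hB]
    unfold Win
    constructor
    · rintro ⟨i, h1, hw⟩
      exact ⟨i, h1, by have := List.length_pos_iff.mpr hne; omega, hw⟩
    · rintro ⟨i, h1, _, hw⟩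
      exact ⟨i, h1, hw⟩
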